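-- pv_equiv track=rewrite | github.com/sabrs0/comp_graph_CP | collector.py | get_neur_links
-- ===== SOURCE A (Python) =====
-- def get_neur_links(neurs):
--     links = []
--     for i in range(len(neurs[0]) - 1):
--         dot1 = [neurs[0][i], neurs[1][i], neurs[2][i]]
--         for j in range(i + 1, len(neurs[0])):
--             dot2 = [neurs[0][j], neurs[1][j], neurs[2][j]]
--             links.append([dot1, dot2])
--     return links
-- ===== SOURCE B (Python) =====
-- def get_neur_links(neurs):
--     points = [[neurs[0][k], neurs[1][k], neurs[2][k]] for k in range(len(neurs[0]))]
--     links = []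
--     while points:
--         head = points.pop(0)
--         links.extend([head, b] for b in points)
--     return links
-- ===== Notes on version B (the rewrite author's own statement) =====
-- stated objective: simpler
-- what changed: Replaces the fused index-based double loop by two phases: one pass builds the point table, then an index-free structural recursion (head-vs-tail) enumerates the i<j pairs.
-- outside the precondition, e.g. on get_neur_links([[5]]): A returns [], B raises IndexError
import Mathlib
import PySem

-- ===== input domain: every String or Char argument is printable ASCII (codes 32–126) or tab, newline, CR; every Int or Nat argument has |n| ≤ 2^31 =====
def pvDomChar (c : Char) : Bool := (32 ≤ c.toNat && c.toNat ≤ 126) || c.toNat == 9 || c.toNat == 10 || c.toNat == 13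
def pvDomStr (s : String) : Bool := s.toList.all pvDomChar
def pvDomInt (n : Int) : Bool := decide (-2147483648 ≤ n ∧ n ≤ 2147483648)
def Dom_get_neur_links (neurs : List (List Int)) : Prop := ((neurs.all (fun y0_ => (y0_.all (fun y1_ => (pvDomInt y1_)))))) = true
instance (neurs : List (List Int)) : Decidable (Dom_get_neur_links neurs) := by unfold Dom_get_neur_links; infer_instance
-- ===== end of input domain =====

-- B splits A's fused index-based double loop into a build-the-point-table pass followed by an
-- index-free structural pair recursion; objective: simpler decomposition, same output.

-- ===== PORT A =====
def get_neur_links (neurs : List (List Int)) : List (List (List Int)) :=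
  (PySem.List.pyRange 0 (((PySem.List.pyGetD neurs 0 []).length : Int) - 1) 1).foldl
    (fun links i =>
      let dot1 := [PySem.List.pyGetD (PySem.List.pyGetD neurs 0 []) i 0,
                   PySem.List.pyGetD (PySem.List.pyGetD neurs 1 []) i 0,
                   PySem.List.pyGetD (PySem.List.pyGetD neurs 2 []) i 0]
      (PySem.List.pyRange (i + 1) ((PySem.List.pyGetD neurs 0 []).length : Int) 1).foldl
        (fun links j =>
          let dot2 := [PySem.List.pyGetD (PySem.List.pyGetD neurs 0 []) j 0,
                       PySem.List.pyGetD (PySem.List.pyGetD neurs 1 []) j 0,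
                       PySem.List.pyGetD (PySem.List.pyGetD neurs 2 []) j 0]
          links ++ [[dot1, dot2]]) links) []

-- ===== PORT B =====
-- Source B's while-loop: consume the head of points, pair it with every remaining point
def pvPairsLoop {α : Type} : List α → List (List α) → List (List α)
  | [], links => links
  | h :: t, links => pvPairsLoop t (links ++ t.map (fun b => [h, b]))

def get_neur_links_alt (neurs : List (List Int)) : List (List (List Int)) :=
  let points := (PySem.List.pyRange 0 ((PySem.List.pyGetD neurs 0 []).length : Int) 1).map
    (fun k => [PySem.List.pyGetD (PySem.List.pyGetD neurs 0 []) k 0,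
               PySem.List.pyGetD (PySem.List.pyGetD neurs 1 []) k 0,
               PySem.List.pyGetD (PySem.List.pyGetD neurs 2 []) k 0])
  pvPairsLoop points []

-- ===== PRECONDITION & SPEC =====
-- Python A raises IndexError on an empty input list and, when len(neurs[0]) ≥ 2, on inputs lacking rows 1
-- and 2 of length ≥ len(neurs[0]). Pre_ additionally excludes inputs with len(neurs[0]) == 1 whose
-- rows 1/2 are missing or empty: A returns an empty result there without touching those rows, but B, which
-- builds every point first, raises IndexError there (see claim cites).
def Pre_get_neur_links (neurs : List (List Int)) : Prop :=
  neurs ≠ [] ∧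
  (1 ≤ (neurs.headI).length →
    3 ≤ neurs.length ∧ (neurs.headI).length ≤ (neurs.getD 1 []).length ∧
      (neurs.headI).length ≤ (neurs.getD 2 []).length)
instance (neurs : List (List Int)) : Decidable (Pre_get_neur_links neurs) := by
  unfold Pre_get_neur_links; infer_instance

def pvWitness_get_neur_links : List (List Int) := [[1, 2], [3, 4], [5, 6]]

def Spec_get_neur_links (neurs : List (List Int)) (out : List (List (List Int))) : Prop := out = get_neur_links_alt neurs
instance (neurs : List (List Int)) (out : List (List (List Int))) : Decidable (Spec_get_neur_links neurs out) := by unfold Spec_get_neur_links; infer_instance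

-- ===== CLAIM (what is proved, stated in full; the proofs are below) =====
def Claim_equal_get_neur_links : Prop := ∀ (neurs : List (List Int)), Dom_get_neur_links neurs → Pre_get_neur_links neurs → Spec_get_neur_links neurs (get_neur_links neurs)

-- ===== LEMMAS AND PROOFS =====

-- proof-side recursive form of the pair enumeration
def pvPairs {α : Type} : List α → List (List α)
  | [] => []
  | h :: t => t.map (fun b => [h, b]) ++ pvPairs t

lemma pvPairsLoop_eq {α : Type} : ∀ (l : List α) (links : List (List α)),
    pvPairsLoop l links = links ++ pvPairs l := by
  intro l
  induction l with
  | nil => intro links; simp [pvPairsLoop, pvPairs]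
  | cons h t ih => intro links; simp [pvPairsLoop, pvPairs, ih]

-- pair recursion on a mapped range = the i<j double-range enumeration
lemma pvPairs_map_range {α : Type} (f : Int → α) :
    ∀ (n : Nat) (a b : Int), (b - a).toNat = n →
      pvPairs ((PySem.List.pyRange a b 1).map f)
        = (PySem.List.pyRange a (b - 1) 1).flatMap
            (fun i => (PySem.List.pyRange (i + 1) b 1).map (fun j => [f i, f j])) := by
  intro n
  induction n with
  | zero =>
      intro a b h
      have hba : b ≤ a := by omega
      rw [PySem.List.pyRange_one_eq_nil hba, PySem.List.pyRange_one_eq_nil (by omega : b - 1 ≤ a)]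
      simp [pvPairs]
  | succ n ih =>
      intro a b h
      have hab : a < b := by omega
      rw [PySem.List.pyRange_one_cons hab]
      simp only [List.map_cons, pvPairs, List.map_map]
      rw [ih (a + 1) b (by omega)]
      by_cases hab1 : a < b - 1
      · rw [PySem.List.pyRange_one_cons hab1]
        simp [Function.comp]
      · -- a = b - 1 : both sides are empty
        have hb : b = a + 1 := by omega
        rw [PySem.List.pyRange_one_eq_nil (by omega : b - 1 ≤ a)]
        subst hb
        rw [PySem.List.pyRange_one_eq_nil (by omega : a + 1 ≤ a + 1)]
        simp

-- ===== VERDICT (by name: the statement is the Claim_ definition above) =====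
theorem get_neur_links_spec : Claim_equal_get_neur_links := by
  intro neurs _ _
  unfold Spec_get_neur_links get_neur_links get_neur_links_alt
  rw [pvPairsLoop_eq, List.nil_append]
  rw [pvPairs_map_range _ ((PySem.List.pyGetD neurs 0 []).length) 0
        ((PySem.List.pyGetD neurs 0 []).length : Int) (by omega)]
  simp only [PySem.List.foldl_append_singleton_eq_map, PySem.List.foldl_append_eq_flatMap,
    List.nil_append]
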